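-- pv_equiv track=rewrite | github.com/DarsheeeGamer/KOS | kos/compute/universal_api.py | _hip_to_cuda
-- ===== SOURCE A (Python) =====
-- def _hip_to_cuda(hip_source: str) -> str:
--     """Convert HIP source to CUDA"""
--     cuda_source = hip_source
--
--     # Basic HIP to CUDA conversions (reverse of above)
--     replacements = {
--         'hipMalloc': 'cudaMalloc',
--         'hipFree': 'cudaFree',
--         'hipMemcpy': 'cudaMemcpy',
--         'hipDeviceSynchronize': 'cudaDeviceSynchronize',
--         'hipBlockIdx': 'blockIdx',
--         'hipBlockDim': 'blockDim',
--         'hipThreadIdx': 'threadIdx',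
--         'hipGridDim': 'gridDim',
--         'hipError_t': 'cudaError_t',
--         'hipSuccess': 'cudaSuccess'
--     }
--
--     for hip_term, cuda_term in replacements.items():
--         cuda_source = cuda_source.replace(hip_term, cuda_term)
--
--     return cuda_source
-- ===== SOURCE B (Python) =====
-- _HIP_TO_CUDA_TABLE = [
--     ('hipMalloc', 'cudaMalloc'),
--     ('hipFree', 'cudaFree'),
--     ('hipMemcpy', 'cudaMemcpy'),
--     ('hipDeviceSynchronize', 'cudaDeviceSynchronize'),
--     ('hipBlockIdx', 'blockIdx'),
--     ('hipBlockDim', 'blockDim'),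
--     ('hipThreadIdx', 'threadIdx'),
--     ('hipGridDim', 'gridDim'),
--     ('hipError_t', 'cudaError_t'),
--     ('hipSuccess', 'cudaSuccess'),
-- ]
--
--
-- def _hip_to_cuda(hip_source: str) -> str:
--     """Convert HIP source to CUDA in a single left-to-right scan."""
--     out = []
--     i = 0
--     n = len(hip_source)
--     while i < n:
--         for hip_term, cuda_term in _HIP_TO_CUDA_TABLE:
--             if hip_source.startswith(hip_term, i):
--                 out.append(cuda_term)
--                 i += len(hip_term)
--                 break
--         else:
--             out.append(hip_source[i])
--             i += 1
--     return ''.join(out)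
-- ===== Notes on version B (the rewrite author's own statement) =====
-- stated objective: alternative
-- what changed: Replaced ten sequential full-string str.replace passes with a single left-to-right scan that, at each position, emits the replacement of the first matching HIP term (or copies the character), so each input character is examined once and replacements never cascade.
-- intended difference: On inputs containing 'hipError_hipThreadIdx', A's hipThreadIdx->threadIdx pass fabricates a fresh 'hipError_t' occurrence out of text that was not a HIP term and a later pass rewrites it, so A returns '...cudaError_threadIdx...'; B replaces only HIP terms actually present in the source and returns '...hipError_threadIdx...', which is the intended per-occurrence replacement. — e.g. on _hip_to_cuda("hipError_hipThreadIdx"): A returns "cudaError_threadIdx", B returns "hipError_threadIdx"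
import Mathlib
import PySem

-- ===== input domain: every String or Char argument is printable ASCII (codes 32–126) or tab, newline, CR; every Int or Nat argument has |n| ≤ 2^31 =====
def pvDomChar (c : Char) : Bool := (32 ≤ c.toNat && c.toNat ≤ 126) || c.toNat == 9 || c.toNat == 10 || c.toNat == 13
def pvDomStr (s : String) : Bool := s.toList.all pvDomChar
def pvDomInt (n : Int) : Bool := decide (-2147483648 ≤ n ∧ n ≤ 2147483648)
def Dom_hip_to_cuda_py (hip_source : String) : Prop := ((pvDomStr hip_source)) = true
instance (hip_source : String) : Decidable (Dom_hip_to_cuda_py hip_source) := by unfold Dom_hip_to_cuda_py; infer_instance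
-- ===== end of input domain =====

-- B replaces the ten sequential str.replace passes by ONE left-to-right scan that at each
-- position emits the replacement of the first matching HIP term (or copies the character);
-- same table, but replacements can no longer cascade (see D_ below).

-- ===== PORT A =====
def hip_to_cuda_py (hip_source : String) : String :=
  let cuda_source := hip_source
  let replacements : PySem.Dict String String := PySem.Dict.ofList
    [("hipMalloc", "cudaMalloc"),
     ("hipFree", "cudaFree"),
     ("hipMemcpy", "cudaMemcpy"),
     ("hipDeviceSynchronize", "cudaDeviceSynchronize"),
     ("hipBlockIdx", "blockIdx"),
     ("hipBlockDim", "blockDim"),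
     ("hipThreadIdx", "threadIdx"),
     ("hipGridDim", "gridDim"),
     ("hipError_t", "cudaError_t"),
     ("hipSuccess", "cudaSuccess")]
  replacements.items.foldl (fun cuda_source p => PySem.Str.replace cuda_source p.1 p.2) cuda_source

-- ===== PORT B =====
-- Source B's replacement table, in dict order
def pvTableB : List (List Char × List Char) :=
  [("hipMalloc".toList, "cudaMalloc".toList),
   ("hipFree".toList, "cudaFree".toList),
   ("hipMemcpy".toList, "cudaMemcpy".toList),
   ("hipDeviceSynchronize".toList, "cudaDeviceSynchronize".toList),
   ("hipBlockIdx".toList, "blockIdx".toList),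
   ("hipBlockDim".toList, "blockDim".toList),
   ("hipThreadIdx".toList, "threadIdx".toList),
   ("hipGridDim".toList, "gridDim".toList),
   ("hipError_t".toList, "cudaError_t".toList),
   ("hipSuccess".toList, "cudaSuccess".toList)]

-- Source B's `while i < n` loop: at the current position try the table entries in order; on the
-- first key the remaining input starts with, emit its value and skip the key, else copy one
-- character.  The fuel argument (= number of characters left, as in the while condition) and
-- the `k.length = 0` test are only totality guards: table keys are nonempty and every step
-- consumes at least one character.
def pvScanGo (tbl : List (List Char × List Char)) : Nat → List Char → List Char
  | _, [] => []
  | 0, l => l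
  | fuel + 1, c :: t =>
    match tbl.find? (fun p => p.1.isPrefixOf (c :: t)) with
    | some (k, v) =>
        if k.length = 0 then c :: pvScanGo tbl fuel t
        else v ++ pvScanGo tbl fuel ((c :: t).drop k.length)
    | none => c :: pvScanGo tbl fuel t

def hip_to_cuda_py_alt (hip_source : String) : String :=
  String.ofList (pvScanGo pvTableB hip_source.toList.length hip_source.toList)

-- ===== PRECONDITION & SPEC =====
-- On inputs containing 'hipError_hipThreadIdx', A's hipThreadIdx→threadIdx pass fabricates a
-- fresh 'hipError_t' occurrence out of text that was not a HIP term and the later hipError_t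
-- pass rewrites it too, giving '…cudaError_threadIdx…'; B replaces only the HIP terms present
-- in the source and returns '…hipError_threadIdx…', the intended per-occurrence replacement.
def D_hip_to_cuda_py (hip_source : String) : Prop :=
  PySem.Str.isIn "hipError_hipThreadIdx" hip_source = true
instance (hip_source : String) : Decidable (D_hip_to_cuda_py hip_source) := by
  unfold D_hip_to_cuda_py; infer_instance

def Spec_hip_to_cuda_py (hip_source : String) (out : String) : Prop :=
  ¬ D_hip_to_cuda_py hip_source → out = hip_to_cuda_py_alt hip_source
instance (hip_source : String) (out : String) : Decidable (Spec_hip_to_cuda_py hip_source out) := by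
  unfold Spec_hip_to_cuda_py; infer_instance

def pvDiffWitness_hip_to_cuda_py : String := "hipError_hipThreadIdx"
def pvDiffWitnessOut_hip_to_cuda_py : String × String := ("cudaError_threadIdx", "hipError_threadIdx")

-- ===== CLAIM (what is proved, stated in full; the proofs are below) =====
def Claim_unchanged_hip_to_cuda_py : Prop := ∀ (hip_source : String), Dom_hip_to_cuda_py hip_source → Spec_hip_to_cuda_py hip_source (hip_to_cuda_py hip_source)
def Claim_exact_hip_to_cuda_py : Prop := ∀ (hip_source : String), Dom_hip_to_cuda_py hip_source → D_hip_to_cuda_py hip_source → hip_to_cuda_py hip_source ≠ hip_to_cuda_py_alt hip_source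
def Claim_changed_hip_to_cuda_py : Prop := Dom_hip_to_cuda_py (pvDiffWitness_hip_to_cuda_py) ∧ D_hip_to_cuda_py (pvDiffWitness_hip_to_cuda_py) ∧ hip_to_cuda_py (pvDiffWitness_hip_to_cuda_py) = pvDiffWitnessOut_hip_to_cuda_py.1 ∧ hip_to_cuda_py_alt (pvDiffWitness_hip_to_cuda_py) = pvDiffWitnessOut_hip_to_cuda_py.2 ∧ pvDiffWitnessOut_hip_to_cuda_py.1 ≠ pvDiffWitnessOut_hip_to_cuda_py.2

-- ===== LEMMAS AND PROOFS =====

-- the cascade pattern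
def pvPat : List Char := "hipError_hipThreadIdx".toList

-- proof-side version of B's scan (no fuel), easier to induct on
def pvScan (tbl : List (List Char × List Char)) (s : List Char) : List Char :=
  match s with
  | [] => []
  | c :: t =>
    match tbl.find? (fun p => p.1.isPrefixOf (c :: t)) with
    | some (k, v) =>
        if k.length = 0 then c :: pvScan tbl t
        else v ++ pvScan tbl ((c :: t).drop k.length)
    | none => c :: pvScan tbl t
termination_by s.length
decreasing_by all_goals (simp; try omega)

theorem pvScanGo_eq (tbl : List (List Char × List Char)) :
    ∀ (fuel : Nat) (l : List Char), l.length ≤ fuel → pvScanGo tbl fuel l = pvScan tbl l := by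
  intro fuel
  induction fuel with
  | zero =>
    intro l hl
    have : l = [] := List.length_eq_zero_iff.mp (Nat.le_zero.mp hl)
    subst this
    rw [pvScanGo, pvScan]
  | succ fuel ih =>
    intro l hl
    match l with
    | [] => rw [pvScanGo, pvScan]
    | c :: t =>
      rw [pvScanGo, pvScan]
      cases hf : List.find? (fun p => p.1.isPrefixOf (c :: t)) tbl with
      | none => simp only; rw [ih t (by simpa using hl)]
      | some p =>
        match p with
        | (k, v) =>
          simp only
          by_cases hk : k.length = 0
          · rw [if_pos hk, if_pos hk, ih t (by simpa using hl)]
          · rw [if_neg hk, if_neg hk, ih ((c :: t).drop k.length) (by simp at hl ⊢; omega)]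

-- one pass of Python's s.replace(k, v), recursively (left-to-right, non-overlapping)
def pvRepl (k v : List Char) (s : List Char) : List Char :=
  match s with
  | [] => []
  | c :: t =>
    if k.isPrefixOf (c :: t) then
      if k.length = 0 then c :: pvRepl k v t
      else v ++ pvRepl k v ((c :: t).drop k.length)
    else c :: pvRepl k v t
termination_by s.length
decreasing_by all_goals (simp; try omega)

-- equation lemmas for pvRepl
theorem pvRepl_nil (k v : List Char) : pvRepl k v [] = [] := by
  rw [pvRepl]

theorem pvRepl_cons_neg (k v : List Char) (c : Char) (t : List Char)
    (h : ¬ k <+: c :: t) : pvRepl k v (c :: t) = c :: pvRepl k v t := by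
  rw [pvRepl]
  simp [List.isPrefixOf_iff_prefix, h]

theorem pvRepl_head (k v s : List Char) (hk : k ≠ []) (h : k <+: s) :
    pvRepl k v s = v ++ pvRepl k v (s.drop k.length) := by
  match s with
  | [] =>
    exact absurd (List.prefix_nil.mp h) hk
  | c :: t =>
    rw [pvRepl]
    simp [List.isPrefixOf_iff_prefix, h, List.length_eq_zero_iff, hk]

theorem pvRepl_go (k v : List Char) (hk : k ≠ []) :
    ∀ (fuel : Nat) (l acc : List Char), l.length ≤ fuel →
      PySem.Chars.replace.go k v fuel l acc = acc.reverse ++ pvRepl k v l := by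
  intro fuel
  induction fuel with
  | zero =>
    intro l acc hl
    have : l = [] := List.length_eq_zero_iff.mp (Nat.le_zero.mp hl)
    subst this
    rw [PySem.Chars.replace.go, pvRepl_nil]
  | succ fuel ih =>
    intro l acc hl
    match l with
    | [] =>
      simp [PySem.Chars.replace.go, pvRepl_nil]
    | c :: t =>
      rw [PySem.Chars.replace.go]
      by_cases hpre : k.isPrefixOf (c :: t) = true
      · rw [if_pos hpre]
        have hkl : 0 < k.length := List.length_pos_iff.mpr hk
        have hdl : ((c :: t).drop k.length).length ≤ fuel := by
          simp at hl ⊢; omega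
        rw [ih ((c :: t).drop k.length) (v.reverse ++ acc) hdl]
        rw [pvRepl_head k v (c :: t) hk (List.isPrefixOf_iff_prefix.mp hpre)]
        simp
      · rw [if_neg hpre]
        rw [ih t (c :: acc) (by simpa using hl)]
        rw [pvRepl_cons_neg k v c t (by simpa [List.isPrefixOf_iff_prefix] using hpre)]
        simp

theorem pvRepl_eq_replace (s k v : List Char) (hk : k ≠ []) :
    PySem.Chars.replace s k v = pvRepl k v s := by
  rw [PySem.Chars.replace]
  simp only [List.isEmpty_iff, hk]
  rw [pvRepl_go k v hk s.length s [] (le_refl _)]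
  simp

theorem pvStr_replace_toList (s k v : String) (hk : k.toList ≠ []) :
    (PySem.Str.replace s k v).toList = pvRepl k.toList v.toList s.toList := by
  rw [PySem.Str.toList_replace, pvRepl_eq_replace _ _ _ hk]

-- prefix of an append is a prefix of the left part or extends it
theorem pvPrefix_append_cases {a w y : List Char} (h : a <+: w ++ y) :
    a <+: w ∨ w <+: a := by
  by_cases hl : a.length ≤ w.length
  · exact Or.inl (List.prefix_of_prefix_length_le h (w.prefix_append y) hl)
  · exact Or.inr (List.prefix_of_prefix_length_le (w.prefix_append y) h (by omega))

-- equation lemmas for pvScan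
theorem pvScan_nil (tbl : List (List Char × List Char)) : pvScan tbl [] = [] := by
  rw [pvScan]

theorem pvScan_cons_none (tbl : List (List Char × List Char)) (c : Char) (t : List Char)
    (h : tbl.find? (fun p => p.1.isPrefixOf (c :: t)) = none) :
    pvScan tbl (c :: t) = c :: pvScan tbl t := by
  rw [pvScan, h]

theorem pvScan_cons_some (tbl : List (List Char × List Char)) (c : Char) (t : List Char)
    (k v : List Char) (hk : k ≠ [])
    (h : tbl.find? (fun p => p.1.isPrefixOf (c :: t)) = some (k, v)) :
    pvScan tbl (c :: t) = v ++ pvScan tbl ((c :: t).drop k.length) := by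
  rw [pvScan, h]
  simp [List.length_eq_zero_iff, hk]

theorem pvScan_empty (s : List Char) : pvScan [] s = s := by
  induction s with
  | nil => exact pvScan_nil _
  | cons c t ih => rw [pvScan_cons_none _ _ _ (by simp), ih]

-- a replace pass walks through a block w it cannot match inside
theorem pvRepl_pass (k v w y : List Char)
    (H : ∀ m < w.length, ¬ k <+: w.drop m ∧ ¬ w.drop m <+: k) :
    pvRepl k v (w ++ y) = w ++ pvRepl k v y := by
  induction w with
  | nil => simp
  | cons c w' ih =>
    have h0 := H 0 (by simp)
    have hnp : ¬ k <+: c :: (w' ++ y) := by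
      intro hpre
      rcases pvPrefix_append_cases (w := c :: w') (by simpa using hpre) with h | h
      · exact h0.1 (by simpa using h)
      · exact h0.2 (by simpa using h)
    have ih' := ih (fun m hm => H (m + 1) (by simpa using Nat.succ_lt_succ hm))
    rw [List.cons_append, pvRepl_cons_neg k v c (w' ++ y) hnp, ih']
    simp

-- the scan walks through a block w no table key can match inside
theorem pvScan_pass (tbl : List (List Char × List Char)) (w y : List Char)
    (H : ∀ m < w.length, ∀ p ∈ tbl, ¬ p.1 <+: w.drop m ++ y) :
    pvScan tbl (w ++ y) = w ++ pvScan tbl y := by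
  induction w with
  | nil => simp
  | cons c w' ih =>
    have hnone : tbl.find? (fun p => p.1.isPrefixOf (c :: (w' ++ y))) = none := by
      rw [List.find?_eq_none]
      intro p hp
      simp only [List.isPrefixOf_iff_prefix]
      exact fun hc => H 0 (by simp) p hp (by simpa using hc)
    have ih' := ih (fun m hm p hp => H (m + 1) (by simpa using Nat.succ_lt_succ hm) p hp)
    rw [List.cons_append, pvScan_cons_none _ _ _ hnone, ih']
    simp

-- no suffix of the new key k can match at the head of the scan's output, unless the cascade
-- pattern pat is present in the original input
theorem pvScan_no_new_head (pat : List Char) (tbl : List (List Char × List Char)) (k : List Char)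
    (Hne : ∀ p ∈ tbl, p.1 ≠ [])
    (H1 : ∀ p ∈ tbl, ∀ m < k.length, 1 ≤ m → ¬ p.2 <+: k.drop m)
    (HA : ∀ p ∈ tbl, ∀ m < k.length, 1 ≤ m → k.drop m <+: p.2 → k.take m ++ p.1 = pat) :
    ∀ (t : List Char) (m : Nat), 1 ≤ m → m < k.length →
      ¬ k.drop m <+: t → ¬ pat <+: k.take m ++ t → ¬ k.drop m <+: pvScan tbl t := by
  intro t
  induction t with
  | nil =>
    intro m h1 h2 _ _ hcon
    rw [pvScan_nil] at hcon
    have : k.drop m = [] := List.prefix_nil.mp hcon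
    have : k.length - m = 0 := by simpa using congrArg List.length this
    omega
  | cons d t' ih =>
    intro m h1 h2 hnp hpat
    have hd : k.drop m = k[m] :: k.drop (m + 1) := List.drop_eq_getElem_cons h2
    cases hf : tbl.find? (fun p => p.1.isPrefixOf (d :: t')) with
    | none =>
      rw [pvScan_cons_none _ _ _ hf]
      intro hcon
      rw [hd] at hcon
      have hheads : k[m] = d ∧ k.drop (m + 1) <+: pvScan tbl t' := by
        rwa [List.cons_prefix_cons] at hcon
      by_cases hlast : m + 1 < k.length
      · -- inner position: use the induction hypothesis one character further in
        have htake : k.take (m + 1) = k.take m ++ [k[m]] := by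
          rw [List.take_add_one]
          simp [List.getElem?_eq_getElem h2]
        have hnp' : ¬ k.drop (m + 1) <+: t' := by
          intro hc
          exact hnp (by rw [hd, hheads.1]; exact List.cons_prefix_cons.mpr ⟨rfl, hc⟩)
        have hpat' : ¬ pat <+: k.take (m + 1) ++ t' := by
          rw [htake, hheads.1]
          simpa using hpat
        exact ih (m + 1) (by omega) hlast hnp' hpat' hheads.2
      · -- k.drop m is the single character [d]: then k.drop m <+: d :: t', contradiction
        have hkd : k.drop (m + 1) = [] := by
          have h := List.length_drop (l := k) (i := m + 1)
          apply List.length_eq_zero_iff.mp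
          omega
        exact hnp (by rw [hd, hheads.1, hkd]; exact List.cons_prefix_cons.mpr ⟨rfl, List.nil_prefix⟩)
    | some p =>
      match p with
      | (k', v') =>
        have hmem : (k', v') ∈ tbl := List.mem_of_find?_eq_some hf
        have hk' : k' <+: d :: t' := List.isPrefixOf_iff_prefix.mp (by simpa using List.find?_some hf)
        rw [pvScan_cons_some tbl d t' k' v' (Hne _ hmem) hf]
        intro hcon
        rcases pvPrefix_append_cases hcon with hc | hc
        · -- k.drop m reaches into the emitted value: forces the cascade pattern
          have hpp : k.take m ++ k' = pat := HA (k', v') hmem m h2 h1 hc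
          rcases hk' with ⟨z, hz⟩
          exact hpat ⟨z, by rw [← hpp, ← hz]; simp⟩
        · exact H1 (k', v') hmem m h2 h1 hc

-- adding one (incompatible, new) replacement pair to the scan equals running one more
-- replace pass afterwards, on inputs avoiding pat
theorem pvScan_snoc (pat : List Char) (tbl : List (List Char × List Char)) (k v : List Char)
    (hk : k ≠ [])
    (Hne : ∀ p ∈ tbl, p.1 ≠ [])
    (Hdist : ∀ p ∈ tbl, ¬ p.1 <+: k ∧ ¬ k <+: p.1)
    (Hval : ∀ p ∈ tbl, ∀ m < p.2.length, ¬ k <+: p.2.drop m ∧ ¬ p.2.drop m <+: k)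
    (Hinner : ∀ p ∈ tbl, ∀ m < k.length, 1 ≤ m → ¬ p.1 <+: k.drop m ∧ ¬ k.drop m <+: p.1)
    (H1 : ∀ p ∈ tbl, ∀ m < k.length, 1 ≤ m → ¬ p.2 <+: k.drop m)
    (HA : ∀ p ∈ tbl, ∀ m < k.length, 1 ≤ m → k.drop m <+: p.2 → k.take m ++ p.1 = pat) :
    ∀ (s : List Char), ¬ pat <:+: s →
      pvRepl k v (pvScan tbl s) = pvScan (tbl ++ [(k, v)]) s := by
  have main : ∀ (n : Nat) (s : List Char), s.length ≤ n → ¬ pat <:+: s →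
      pvRepl k v (pvScan tbl s) = pvScan (tbl ++ [(k, v)]) s := by
    intro n
    induction n with
    | zero =>
      intro s hl _
      have : s = [] := List.length_eq_zero_iff.mp (Nat.le_zero.mp hl)
      subst this
      rw [pvScan_nil, pvScan_nil, pvRepl_nil]
    | succ n ih =>
      intro s hl havoid
      match s with
      | [] => rw [pvScan_nil, pvScan_nil, pvRepl_nil]
      | c :: t =>
        cases hf : tbl.find? (fun p => p.1.isPrefixOf (c :: t)) with
        | some p =>
          match p with
          | (kj, vj) =>
            have hmem : (kj, vj) ∈ tbl := List.mem_of_find?_eq_some hf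
            have hkjne : kj ≠ [] := Hne _ hmem
            have hkjpos : 0 < kj.length := List.length_pos_iff.mpr hkjne
            rw [pvScan_cons_some tbl c t kj vj hkjne hf]
            rw [pvRepl_pass k v vj _ (fun m hm => Hval (kj, vj) hmem m hm)]
            have hdl : ((c :: t).drop kj.length).length ≤ n := by
              simp at hl ⊢; omega
            have hda : ¬ pat <:+: (c :: t).drop kj.length := fun hc =>
              havoid (hc.trans (List.drop_suffix _ _).isInfix)
            rw [ih _ hdl hda]
            have hfind : (tbl ++ [(k, v)]).find? (fun p => p.1.isPrefixOf (c :: t))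
                = some (kj, vj) := by
              rw [List.find?_append, hf]; rfl
            rw [pvScan_cons_some (tbl ++ [(k, v)]) c t kj vj hkjne hfind]
        | none =>
          by_cases hk0 : k <+: c :: t
          · -- the new key matches at the head
            obtain ⟨z, hz⟩ := hk0
            have hzdrop : (c :: t).drop k.length = z := by
              rw [← hz, List.drop_left]
            have hscan : pvScan tbl (c :: t) = k ++ pvScan tbl z := by
              conv_lhs => rw [← hz]
              apply pvScan_pass
              intro m hm p hp
              match m with
              | 0 =>
                intro hc
                have := List.find?_eq_none.mp hf p hp
                simp only [List.isPrefixOf_iff_prefix] at this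
                exact this (by simpa [hz] using hc)
              | m + 1 =>
                intro hc
                rcases pvPrefix_append_cases hc with h | h
                · exact (Hinner p hp (m + 1) hm (by omega)).1 h
                · exact (Hinner p hp (m + 1) hm (by omega)).2 h
            rw [hscan]
            rw [pvRepl_head k v _ hk (k.prefix_append _)]
            rw [List.drop_left]
            have hzl : z.length ≤ n := by
              have := congrArg List.length hz
              have hkpos : 0 < k.length := List.length_pos_iff.mpr hk
              simp at this hl ⊢; omega
            have hza : ¬ pat <:+: z := fun hc => by
              refine havoid (hc.trans ?_)
              rw [← hz]
              exact (List.suffix_append k z).isInfix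
            rw [ih z hzl hza]
            have hfind : (tbl ++ [(k, v)]).find? (fun p => p.1.isPrefixOf (c :: t))
                = some (k, v) := by
              rw [List.find?_append, hf]
              simp [List.isPrefixOf_iff_prefix]
              exact ⟨z, hz⟩
            rw [pvScan_cons_some (tbl ++ [(k, v)]) c t k v hk hfind, hzdrop]
          · -- no key matches at the head: both sides copy c
            rw [pvScan_cons_none tbl c t hf]
            have hnomatch : ¬ k <+: c :: pvScan tbl t := by
              intro hcon
              match k, hk with
              | a :: k', _ =>
                rw [List.cons_prefix_cons] at hcon
                obtain ⟨rfl, htail⟩ := hcon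
                match k', htail with
                | [], _ => exact hk0 (List.cons_prefix_cons.mpr ⟨rfl, List.nil_prefix⟩)
                | b :: k'', htail =>
                  refine pvScan_no_new_head pat tbl (a :: b :: k'') Hne H1 HA t 1
                    (le_refl 1) (by simp) ?_ ?_ htail
                  · intro hc
                    exact hk0 (List.cons_prefix_cons.mpr ⟨rfl, hc⟩)
                  · simpa using fun hc => havoid hc.isInfix
            rw [pvRepl_cons_neg k v c _ hnomatch]
            have hfind : (tbl ++ [(k, v)]).find? (fun p => p.1.isPrefixOf (c :: t))
                = none := by
              rw [List.find?_append, hf]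
              simp [List.isPrefixOf_iff_prefix]
              exact hk0
            rw [pvScan_cons_none (tbl ++ [(k, v)]) c t hfind]
            have hta : ¬ pat <:+: t := fun hc =>
              havoid (hc.trans (List.suffix_cons c t).isInfix)
            rw [ih t (by simpa using Nat.lt_succ_iff.mp (by simpa using hl)) hta]
  exact fun s => main s.length s (le_refl _)

-- the ten sequential passes of A equal B's one-pass scan, on inputs avoiding the pattern
theorem pvChain_eq_scan : ∀ (l : List Char), ¬ pvPat <:+: l →
    pvRepl "hipSuccess".toList "cudaSuccess".toList (pvRepl "hipError_t".toList "cudaError_t".toList (pvRepl "hipGridDim".toList "gridDim".toList (pvRepl "hipThreadIdx".toList "threadIdx".toList (pvRepl "hipBlockDim".toList "blockDim".toList (pvRepl "hipBlockIdx".toList "blockIdx".toList (pvRepl "hipDeviceSynchronize".toList "cudaDeviceSynchronize".toList (pvRepl "hipMemcpy".toList "cudaMemcpy".toList (pvRepl "hipFree".toList "cudaFree".toList (pvRepl "hipMalloc".toList "cudaMalloc".toList (l)))))))))) = pvScan pvTableB l := by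
  intro l hl
  have h1 := pvScan_snoc pvPat ([] : List (List Char × List Char)) "hipMalloc".toList "cudaMalloc".toList
    (by decide) (by decide) (by decide) (by decide) (by decide) (by decide) (by decide) l hl
  rw [show ([] : List (List Char × List Char)) ++ [("hipMalloc".toList, "cudaMalloc".toList)] = List.take 1 pvTableB from by decide] at h1
  have h2 := pvScan_snoc pvPat (List.take 1 pvTableB) "hipFree".toList "cudaFree".toList
    (by decide) (by decide) (by decide) (by decide) (by decide) (by decide) (by decide) l hl
  rw [show (List.take 1 pvTableB) ++ [("hipFree".toList, "cudaFree".toList)] = List.take 2 pvTableB from by decide] at h2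
  have h3 := pvScan_snoc pvPat (List.take 2 pvTableB) "hipMemcpy".toList "cudaMemcpy".toList
    (by decide) (by decide) (by decide) (by decide) (by decide) (by decide) (by decide) l hl
  rw [show (List.take 2 pvTableB) ++ [("hipMemcpy".toList, "cudaMemcpy".toList)] = List.take 3 pvTableB from by decide] at h3
  have h4 := pvScan_snoc pvPat (List.take 3 pvTableB) "hipDeviceSynchronize".toList "cudaDeviceSynchronize".toList
    (by decide) (by decide) (by decide) (by decide) (by decide) (by decide) (by decide) l hl
  rw [show (List.take 3 pvTableB) ++ [("hipDeviceSynchronize".toList, "cudaDeviceSynchronize".toList)] = List.take 4 pvTableB from by decide] at h4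
  have h5 := pvScan_snoc pvPat (List.take 4 pvTableB) "hipBlockIdx".toList "blockIdx".toList
    (by decide) (by decide) (by decide) (by decide) (by decide) (by decide) (by decide) l hl
  rw [show (List.take 4 pvTableB) ++ [("hipBlockIdx".toList, "blockIdx".toList)] = List.take 5 pvTableB from by decide] at h5
  have h6 := pvScan_snoc pvPat (List.take 5 pvTableB) "hipBlockDim".toList "blockDim".toList
    (by decide) (by decide) (by decide) (by decide) (by decide) (by decide) (by decide) l hl
  rw [show (List.take 5 pvTableB) ++ [("hipBlockDim".toList, "blockDim".toList)] = List.take 6 pvTableB from by decide] at h6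
  have h7 := pvScan_snoc pvPat (List.take 6 pvTableB) "hipThreadIdx".toList "threadIdx".toList
    (by decide) (by decide) (by decide) (by decide) (by decide) (by decide) (by decide) l hl
  rw [show (List.take 6 pvTableB) ++ [("hipThreadIdx".toList, "threadIdx".toList)] = List.take 7 pvTableB from by decide] at h7
  have h8 := pvScan_snoc pvPat (List.take 7 pvTableB) "hipGridDim".toList "gridDim".toList
    (by decide) (by decide) (by decide) (by decide) (by decide) (by decide) (by decide) l hl
  rw [show (List.take 7 pvTableB) ++ [("hipGridDim".toList, "gridDim".toList)] = List.take 8 pvTableB from by decide] at h8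
  have h9 := pvScan_snoc pvPat (List.take 8 pvTableB) "hipError_t".toList "cudaError_t".toList
    (by decide) (by decide) (by decide) (by decide) (by decide) (by decide) (by decide) l hl
  rw [show (List.take 8 pvTableB) ++ [("hipError_t".toList, "cudaError_t".toList)] = List.take 9 pvTableB from by decide] at h9
  have h10 := pvScan_snoc pvPat (List.take 9 pvTableB) "hipSuccess".toList "cudaSuccess".toList
    (by decide) (by decide) (by decide) (by decide) (by decide) (by decide) (by decide) l hl
  rw [show (List.take 9 pvTableB) ++ [("hipSuccess".toList, "cudaSuccess".toList)] = List.take 10 pvTableB from by decide] at h10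
  rw [pvScan_empty l] at h1
  rw [h1, h2, h3, h4, h5, h6, h7, h8, h9, h10]
  rw [show List.take 10 pvTableB = pvTableB from by decide]

theorem pvA_toList (s : String) : (hip_to_cuda_py s).toList = pvRepl "hipSuccess".toList "cudaSuccess".toList (pvRepl "hipError_t".toList "cudaError_t".toList (pvRepl "hipGridDim".toList "gridDim".toList (pvRepl "hipThreadIdx".toList "threadIdx".toList (pvRepl "hipBlockDim".toList "blockDim".toList (pvRepl "hipBlockIdx".toList "blockIdx".toList (pvRepl "hipDeviceSynchronize".toList "cudaDeviceSynchronize".toList (pvRepl "hipMemcpy".toList "cudaMemcpy".toList (pvRepl "hipFree".toList "cudaFree".toList (pvRepl "hipMalloc".toList "cudaMalloc".toList (s.toList)))))))))) := by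
  simp only [hip_to_cuda_py]
  rw [show (PySem.Dict.ofList
    [("hipMalloc", "cudaMalloc"),
     ("hipFree", "cudaFree"),
     ("hipMemcpy", "cudaMemcpy"),
     ("hipDeviceSynchronize", "cudaDeviceSynchronize"),
     ("hipBlockIdx", "blockIdx"),
     ("hipBlockDim", "blockDim"),
     ("hipThreadIdx", "threadIdx"),
     ("hipGridDim", "gridDim"),
     ("hipError_t", "cudaError_t"),
     ("hipSuccess", "cudaSuccess")] : PySem.Dict String String).items
    = [("hipMalloc", "cudaMalloc"),
     ("hipFree", "cudaFree"),
     ("hipMemcpy", "cudaMemcpy"),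
     ("hipDeviceSynchronize", "cudaDeviceSynchronize"),
     ("hipBlockIdx", "blockIdx"),
     ("hipBlockDim", "blockDim"),
     ("hipThreadIdx", "threadIdx"),
     ("hipGridDim", "gridDim"),
     ("hipError_t", "cudaError_t"),
     ("hipSuccess", "cudaSuccess")] from by decide]
  simp only [List.foldl_cons, List.foldl_nil]
  rw [pvStr_replace_toList _ "hipSuccess" "cudaSuccess" (by decide), pvStr_replace_toList _ "hipError_t" "cudaError_t" (by decide), pvStr_replace_toList _ "hipGridDim" "gridDim" (by decide), pvStr_replace_toList _ "hipThreadIdx" "threadIdx" (by decide), pvStr_replace_toList _ "hipBlockDim" "blockDim" (by decide), pvStr_replace_toList _ "hipBlockIdx" "blockIdx" (by decide), pvStr_replace_toList _ "hipDeviceSynchronize" "cudaDeviceSynchronize" (by decide), pvStr_replace_toList _ "hipMemcpy" "cudaMemcpy" (by decide), pvStr_replace_toList _ "hipFree" "cudaFree" (by decide), pvStr_replace_toList _ "hipMalloc" "cudaMalloc" (by decide)]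

theorem pvB_toList (s : String) : (hip_to_cuda_py_alt s).toList = pvScan pvTableB s.toList := by
  unfold hip_to_cuda_py_alt
  rw [pvScanGo_eq pvTableB s.toList.length s.toList (le_refl _)]
  simp

-- ---------- tightness: A and B really differ on every input containing the pattern ----------

-- an unconditioned snoc step: when no suffix of k is a prefix of an earlier value, the
-- cascade is impossible and the step holds for every input
theorem pvScan_snoc_free (tbl : List (List Char × List Char)) (k v : List Char)
    (hk : k ≠ [])
    (Hne : ∀ p ∈ tbl, p.1 ≠ [])
    (Hdist : ∀ p ∈ tbl, ¬ p.1 <+: k ∧ ¬ k <+: p.1)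
    (Hval : ∀ p ∈ tbl, ∀ m < p.2.length, ¬ k <+: p.2.drop m ∧ ¬ p.2.drop m <+: k)
    (Hinner : ∀ p ∈ tbl, ∀ m < k.length, 1 ≤ m → ¬ p.1 <+: k.drop m ∧ ¬ k.drop m <+: p.1)
    (Hsuff : ∀ p ∈ tbl, ∀ m < k.length, 1 ≤ m → ¬ p.2 <+: k.drop m ∧ ¬ k.drop m <+: p.2) :
    ∀ (s : List Char), pvRepl k v (pvScan tbl s) = pvScan (tbl ++ [(k, v)]) s := by
  intro s
  refine pvScan_snoc ('a' :: s) tbl k v hk Hne Hdist Hval Hinner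
    (fun p hp m hm h1 => (Hsuff p hp m hm h1).1)
    (fun p hp m hm h1 hd => absurd hd (Hsuff p hp m hm h1).2) s ?_
  intro hc
  have := hc.length_le
  simp at this

theorem pvStep10_free : ∀ (l : List Char),
    pvRepl "hipSuccess".toList "cudaSuccess".toList (pvScan (List.take 9 pvTableB) l)
      = pvScan pvTableB l := by
  intro l
  have h := pvScan_snoc_free (List.take 9 pvTableB) "hipSuccess".toList "cudaSuccess".toList
    (by decide) (by decide) (by decide) (by decide) (by decide) (by decide) l
  rw [show List.take 9 pvTableB ++ [("hipSuccess".toList, "cudaSuccess".toList)] = pvTableB from by decide] at h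
  exact h

theorem pvChain_to8 : ∀ (l : List Char),
    pvRepl "hipSuccess".toList "cudaSuccess".toList (pvRepl "hipError_t".toList "cudaError_t".toList (pvRepl "hipGridDim".toList "gridDim".toList (pvRepl "hipThreadIdx".toList "threadIdx".toList (pvRepl "hipBlockDim".toList "blockDim".toList (pvRepl "hipBlockIdx".toList "blockIdx".toList (pvRepl "hipDeviceSynchronize".toList "cudaDeviceSynchronize".toList (pvRepl "hipMemcpy".toList "cudaMemcpy".toList (pvRepl "hipFree".toList "cudaFree".toList (pvRepl "hipMalloc".toList "cudaMalloc".toList (l))))))))))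
      = pvRepl "hipSuccess".toList "cudaSuccess".toList (pvRepl "hipError_t".toList "cudaError_t".toList (pvScan (List.take 8 pvTableB) l)) := by
  intro l
  have h1 := pvScan_snoc_free ([] : List (List Char × List Char)) "hipMalloc".toList "cudaMalloc".toList
    (by decide) (by decide) (by decide) (by decide) (by decide) (by decide) l
  rw [show ([] : List (List Char × List Char)) ++ [("hipMalloc".toList, "cudaMalloc".toList)] = List.take 1 pvTableB from by decide] at h1
  have h2 := pvScan_snoc_free (List.take 1 pvTableB) "hipFree".toList "cudaFree".toList
    (by decide) (by decide) (by decide) (by decide) (by decide) (by decide) l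
  rw [show List.take 1 pvTableB ++ [("hipFree".toList, "cudaFree".toList)] = List.take 2 pvTableB from by decide] at h2
  have h3 := pvScan_snoc_free (List.take 2 pvTableB) "hipMemcpy".toList "cudaMemcpy".toList
    (by decide) (by decide) (by decide) (by decide) (by decide) (by decide) l
  rw [show List.take 2 pvTableB ++ [("hipMemcpy".toList, "cudaMemcpy".toList)] = List.take 3 pvTableB from by decide] at h3
  have h4 := pvScan_snoc_free (List.take 3 pvTableB) "hipDeviceSynchronize".toList "cudaDeviceSynchronize".toList
    (by decide) (by decide) (by decide) (by decide) (by decide) (by decide) l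
  rw [show List.take 3 pvTableB ++ [("hipDeviceSynchronize".toList, "cudaDeviceSynchronize".toList)] = List.take 4 pvTableB from by decide] at h4
  have h5 := pvScan_snoc_free (List.take 4 pvTableB) "hipBlockIdx".toList "blockIdx".toList
    (by decide) (by decide) (by decide) (by decide) (by decide) (by decide) l
  rw [show List.take 4 pvTableB ++ [("hipBlockIdx".toList, "blockIdx".toList)] = List.take 5 pvTableB from by decide] at h5
  have h6 := pvScan_snoc_free (List.take 5 pvTableB) "hipBlockDim".toList "blockDim".toList
    (by decide) (by decide) (by decide) (by decide) (by decide) (by decide) l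
  rw [show List.take 5 pvTableB ++ [("hipBlockDim".toList, "blockDim".toList)] = List.take 6 pvTableB from by decide] at h6
  have h7 := pvScan_snoc_free (List.take 6 pvTableB) "hipThreadIdx".toList "threadIdx".toList
    (by decide) (by decide) (by decide) (by decide) (by decide) (by decide) l
  rw [show List.take 6 pvTableB ++ [("hipThreadIdx".toList, "threadIdx".toList)] = List.take 7 pvTableB from by decide] at h7
  have h8 := pvScan_snoc_free (List.take 7 pvTableB) "hipGridDim".toList "gridDim".toList
    (by decide) (by decide) (by decide) (by decide) (by decide) (by decide) l
  rw [show List.take 7 pvTableB ++ [("hipGridDim".toList, "gridDim".toList)] = List.take 8 pvTableB from by decide] at h8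
  rw [pvScan_empty l] at h1
  rw [h1, h2, h3, h4, h5, h6, h7, h8]

-- prefix tests against an append whose left block decides them
theorem pvIsPrefixOf_append_false (k b w : List Char) (h1 : ¬ k <+: b) (h2 : ¬ b <+: k) :
    k.isPrefixOf (b ++ w) = false := by
  simp only [← Bool.not_eq_true, List.isPrefixOf_iff_prefix]
  intro hc
  rcases pvPrefix_append_cases hc with h | h
  · exact h1 h
  · exact h2 h

-- an infix of block ++ y that cannot start inside the block is an infix of y
theorem pvInfix_shift (block y pat : List Char)
    (H : ∀ m < block.length, ¬ pat <+: block.drop m ++ y)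
    (h : pat <:+: block ++ y) : pat <:+: y := by
  have hdrop : ∃ j, pat <+: (block ++ y).drop j := by
    rw [PySem.Chars.exists_prefix_drop_iff_isIn, PySem.Chars.isIn_iff_infix]
    exact h
  obtain ⟨j, hj⟩ := hdrop
  by_cases hjb : j < block.length
  · exact absurd (by rwa [List.drop_append_of_le_length (Nat.le_of_lt hjb)] at hj) (H j hjb)
  · have hbl : block.drop j = [] := by
      apply List.length_eq_zero_iff.mp
      simp; omega
    rw [List.drop_append, hbl, List.nil_append] at hj
    rw [← PySem.Chars.isIn_iff_infix, ← PySem.Chars.exists_prefix_drop_iff_isIn]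
    exact ⟨j - block.length, hj⟩

-- generalised match equations for the scan at a non-cons-literal head
theorem pvScan_match (tbl : List (List Char × List Char)) (s k v : List Char)
    (hk : k ≠ []) (hs : s ≠ [])
    (h : tbl.find? (fun p => p.1.isPrefixOf s) = some (k, v)) :
    pvScan tbl s = v ++ pvScan tbl (s.drop k.length) := by
  match s, hs with
  | c :: t, _ => exact pvScan_cons_some tbl c t k v hk h

-- find? over the first tables at a position starting with hipThreadIdx
theorem pvFind8 : ∀ (w : List Char),
    (List.take 8 pvTableB).find? (fun p => p.1.isPrefixOf ("hipThreadIdx".toList ++ w))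
      = some ("hipThreadIdx".toList, "threadIdx".toList) := by
  intro w
  rw [show List.take 8 pvTableB = [("hipMalloc".toList, "cudaMalloc".toList), ("hipFree".toList, "cudaFree".toList), ("hipMemcpy".toList, "cudaMemcpy".toList), ("hipDeviceSynchronize".toList, "cudaDeviceSynchronize".toList), ("hipBlockIdx".toList, "blockIdx".toList), ("hipBlockDim".toList, "blockDim".toList), ("hipThreadIdx".toList, "threadIdx".toList), ("hipGridDim".toList, "gridDim".toList)] from by decide]
  rw [List.find?_cons_of_neg (by rw [pvIsPrefixOf_append_false "hipMalloc".toList "hipThreadIdx".toList w (by decide) (by decide)]; simp)]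
  rw [List.find?_cons_of_neg (by rw [pvIsPrefixOf_append_false "hipFree".toList "hipThreadIdx".toList w (by decide) (by decide)]; simp)]
  rw [List.find?_cons_of_neg (by rw [pvIsPrefixOf_append_false "hipMemcpy".toList "hipThreadIdx".toList w (by decide) (by decide)]; simp)]
  rw [List.find?_cons_of_neg (by rw [pvIsPrefixOf_append_false "hipDeviceSynchronize".toList "hipThreadIdx".toList w (by decide) (by decide)]; simp)]
  rw [List.find?_cons_of_neg (by rw [pvIsPrefixOf_append_false "hipBlockIdx".toList "hipThreadIdx".toList w (by decide) (by decide)]; simp)]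
  rw [List.find?_cons_of_neg (by rw [pvIsPrefixOf_append_false "hipBlockDim".toList "hipThreadIdx".toList w (by decide) (by decide)]; simp)]
  exact List.find?_cons_of_pos (by simp)

theorem pvFind9 : ∀ (w : List Char),
    (List.take 9 pvTableB).find? (fun p => p.1.isPrefixOf ("hipThreadIdx".toList ++ w))
      = some ("hipThreadIdx".toList, "threadIdx".toList) := by
  intro w
  rw [show List.take 9 pvTableB = [("hipMalloc".toList, "cudaMalloc".toList), ("hipFree".toList, "cudaFree".toList), ("hipMemcpy".toList, "cudaMemcpy".toList), ("hipDeviceSynchronize".toList, "cudaDeviceSynchronize".toList), ("hipBlockIdx".toList, "blockIdx".toList), ("hipBlockDim".toList, "blockDim".toList), ("hipThreadIdx".toList, "threadIdx".toList), ("hipGridDim".toList, "gridDim".toList), ("hipError_t".toList, "cudaError_t".toList)] from by decide]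
  rw [List.find?_cons_of_neg (by rw [pvIsPrefixOf_append_false "hipMalloc".toList "hipThreadIdx".toList w (by decide) (by decide)]; simp)]
  rw [List.find?_cons_of_neg (by rw [pvIsPrefixOf_append_false "hipFree".toList "hipThreadIdx".toList w (by decide) (by decide)]; simp)]
  rw [List.find?_cons_of_neg (by rw [pvIsPrefixOf_append_false "hipMemcpy".toList "hipThreadIdx".toList w (by decide) (by decide)]; simp)]
  rw [List.find?_cons_of_neg (by rw [pvIsPrefixOf_append_false "hipDeviceSynchronize".toList "hipThreadIdx".toList w (by decide) (by decide)]; simp)]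
  rw [List.find?_cons_of_neg (by rw [pvIsPrefixOf_append_false "hipBlockIdx".toList "hipThreadIdx".toList w (by decide) (by decide)]; simp)]
  rw [List.find?_cons_of_neg (by rw [pvIsPrefixOf_append_false "hipBlockDim".toList "hipThreadIdx".toList w (by decide) (by decide)]; simp)]
  exact List.find?_cons_of_pos (by simp)

-- on a pattern occurrence at the head, the scan (with or without hipError_t in the table)
-- copies "hipError_" and then replaces the hipThreadIdx that is really there
theorem pvHeadScan (tbl : List (List Char × List Char))
    (HF : ∀ m < 9, ∀ p ∈ tbl, ¬ p.1 <+: pvPat.drop m ∧ ¬ pvPat.drop m <+: p.1)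
    (Hfind : ∀ w, tbl.find? (fun p => p.1.isPrefixOf ("hipThreadIdx".toList ++ w))
      = some ("hipThreadIdx".toList, "threadIdx".toList)) :
    ∀ (w : List Char), pvScan tbl (pvPat ++ w) = "hipError_threadIdx".toList ++ pvScan tbl w := by
  intro w
  have hsplit : pvPat ++ w = "hipError_".toList ++ ("hipThreadIdx".toList ++ w) := by
    rw [show pvPat = "hipError_".toList ++ "hipThreadIdx".toList from by decide, List.append_assoc]
  rw [hsplit]
  rw [pvScan_pass tbl "hipError_".toList ("hipThreadIdx".toList ++ w) ?hpass]
  case hpass =>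
    intro m hm p hp hc
    have hm9 : m < 9 := by simpa using hm
    have hre : "hipError_".toList.drop m ++ ("hipThreadIdx".toList ++ w) = pvPat.drop m ++ w := by
      rw [← List.append_assoc]
      have : pvPat.drop m = "hipError_".toList.drop m ++ "hipThreadIdx".toList := by
        rw [show pvPat = "hipError_".toList ++ "hipThreadIdx".toList from by decide]
        exact List.drop_append_of_le_length (by simpa using Nat.le_of_lt hm9)
      rw [this]
    rw [hre] at hc
    rcases pvPrefix_append_cases hc with h | h
    · exact (HF m hm9 p hp).1 h
    · exact (HF m hm9 p hp).2 h
  rw [pvScan_match tbl ("hipThreadIdx".toList ++ w) "hipThreadIdx".toList "threadIdx".toList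
    (by decide) (by simp) (Hfind w)]
  rw [List.drop_left]
  rw [← List.append_assoc]
  congr 1

-- pushing the hipError_t pass through the replaced block
theorem pvHeadRepl9 : ∀ (S : List Char),
    pvRepl "hipError_t".toList "cudaError_t".toList ("hipError_threadIdx".toList ++ S)
      = "cudaError_threadIdx".toList ++ pvRepl "hipError_t".toList "cudaError_t".toList S := by
  intro S
  have hsplit : "hipError_threadIdx".toList ++ S = "hipError_t".toList ++ ("hreadIdx".toList ++ S) := by
    rw [← List.append_assoc]
    congr 1
  rw [hsplit, pvRepl_head _ _ _ (by decide) (List.prefix_append _ _), List.drop_left]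
  rw [pvRepl_pass "hipError_t".toList "cudaError_t".toList "hreadIdx".toList S (by decide)]
  rw [← List.append_assoc]
  congr 1


-- around the first pattern occurrence, A's ninth pass output and B's nine-key scan share a
-- common prefix and then show the cascade difference
theorem pvT : ∀ (l : List Char), pvPat <:+: l →
    ∃ u ra rb : List Char,
      pvRepl "hipError_t".toList "cudaError_t".toList (pvScan (List.take 8 pvTableB) l)
        = u ++ "cudaError_threadIdx".toList ++ ra ∧
      pvScan (List.take 9 pvTableB) l = u ++ "hipError_threadIdx".toList ++ rb := by
  have main : ∀ (n : Nat) (l : List Char), l.length ≤ n → pvPat <:+: l →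
      ∃ u ra rb : List Char,
        pvRepl "hipError_t".toList "cudaError_t".toList (pvScan (List.take 8 pvTableB) l)
          = u ++ "cudaError_threadIdx".toList ++ ra ∧
        pvScan (List.take 9 pvTableB) l = u ++ "hipError_threadIdx".toList ++ rb := by
    intro n
    induction n with
    | zero =>
      intro l hl hinf
      have h1 := hinf.length_le
      have h2 : l = [] := List.length_eq_zero_iff.mp (Nat.le_zero.mp hl)
      subst h2
      simp at h1
      exact absurd h1 (by decide)
    | succ n ih =>
      intro l hl hinf
      by_cases hhead : pvPat <+: l
      · -- the pattern sits at the head: the two sides produce the two different blocks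
        obtain ⟨w, hw⟩ := hhead
        refine ⟨[], pvRepl "hipError_t".toList "cudaError_t".toList (pvScan (List.take 8 pvTableB) w),
          pvScan (List.take 9 pvTableB) w, ?_, ?_⟩
        · rw [← hw, pvHeadScan (List.take 8 pvTableB) (by decide) pvFind8 w, pvHeadRepl9]
          simp
        · rw [← hw, pvHeadScan (List.take 9 pvTableB) (by decide) pvFind9 w]
          simp
      · have hne : l ≠ [] := by
          intro h
          subst h
          have := hinf.length_le
          simp at this
          exact absurd this (by decide)
        obtain ⟨c, t, rfl⟩ := List.exists_cons_of_ne_nil hne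
        cases hf8 : (List.take 8 pvTableB).find? (fun p => p.1.isPrefixOf (c :: t)) with
        | some p =>
          match p with
          | (kj, vj) =>
            have hmem : (kj, vj) ∈ List.take 8 pvTableB := List.mem_of_find?_eq_some hf8
            have hkjne : kj ≠ [] :=
              (by decide : ∀ p ∈ List.take 8 pvTableB, p.1 ≠ []) _ hmem
            have hkjpre : kj <+: c :: t := List.isPrefixOf_iff_prefix.mp (by simpa using List.find?_some hf8)
            obtain ⟨z, hz⟩ := hkjpre
            have hdropz : (c :: t).drop kj.length = z := by rw [← hz, List.drop_left]
            -- both scans fire the same (first-eight) rule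
            have hf9 : (List.take 9 pvTableB).find? (fun p => p.1.isPrefixOf (c :: t))
                = some (kj, vj) := by
              rw [show List.take 9 pvTableB = List.take 8 pvTableB ++ [("hipError_t".toList, "cudaError_t".toList)] from by decide,
                List.find?_append, hf8]
              rfl
            rw [pvScan_cons_some _ c t kj vj hkjne hf8, hdropz,
              pvScan_cons_some _ c t kj vj hkjne hf9, hdropz]
            -- the ninth pass walks through the emitted value
            rw [pvRepl_pass _ _ vj _ (fun m hm =>
              (by decide : ∀ p ∈ List.take 8 pvTableB, ∀ m < p.2.length,
                ¬ "hipError_t".toList <+: p.2.drop m ∧ ¬ p.2.drop m <+: "hipError_t".toList)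
                (kj, vj) hmem m hm)]
            -- the pattern cannot start inside the consumed key, so it survives in z
            have hinf' : pvPat <:+: z := by
              refine pvInfix_shift kj z pvPat ?_ (by rwa [hz])
              intro m hm hc
              rcases pvPrefix_append_cases hc with h | h
              · exact ((by decide : ∀ p ∈ List.take 8 pvTableB, ∀ m < p.1.length,
                  ¬ pvPat <+: p.1.drop m ∧ ¬ p.1.drop m <+: pvPat) (kj, vj) hmem m hm).1 h
              · exact ((by decide : ∀ p ∈ List.take 8 pvTableB, ∀ m < p.1.length,
                  ¬ pvPat <+: p.1.drop m ∧ ¬ p.1.drop m <+: pvPat) (kj, vj) hmem m hm).2 h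
            have hzl : z.length ≤ n := by
              have := congrArg List.length hz
              have : kj.length + z.length = t.length + 1 := by simpa using this
              have hkp : 0 < kj.length := List.length_pos_iff.mpr hkjne
              simp at hl
              omega
            obtain ⟨u, ra, rb, hx, hy⟩ := ih z hzl hinf'
            exact ⟨vj ++ u, ra, rb, by rw [hx]; simp, by rw [hy]; simp⟩
        | none =>
          by_cases h9 : "hipError_t".toList <+: c :: t
          · -- the ninth key itself matches at the head
            obtain ⟨z, hz⟩ := h9
            have hdropz : (c :: t).drop ("hipError_t".toList).length = z := by
              rw [← hz, List.drop_left]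
            -- the eight-key scan walks through the hipError_t block
            have hscan8 : pvScan (List.take 8 pvTableB) (c :: t)
                = "hipError_t".toList ++ pvScan (List.take 8 pvTableB) z := by
              conv_lhs => rw [← hz]
              refine pvScan_pass _ _ _ ?_
              intro m hm p hp hc
              match m, hm with
              | 0, _ =>
                have hn := List.find?_eq_none.mp hf8 p hp
                simp only [List.isPrefixOf_iff_prefix] at hn
                rw [List.drop_zero, hz] at hc
                exact hn hc
              | m + 1, hm =>
                rcases pvPrefix_append_cases hc with h | h
                · exact ((by decide : ∀ p ∈ List.take 8 pvTableB,
                    ∀ m < ("hipError_t".toList).length, 1 ≤ m →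
                    ¬ p.1 <+: "hipError_t".toList.drop m ∧ ¬ "hipError_t".toList.drop m <+: p.1)
                    p hp (m + 1) hm (by omega)).1 h
                · exact ((by decide : ∀ p ∈ List.take 8 pvTableB,
                    ∀ m < ("hipError_t".toList).length, 1 ≤ m →
                    ¬ p.1 <+: "hipError_t".toList.drop m ∧ ¬ "hipError_t".toList.drop m <+: p.1)
                    p hp (m + 1) hm (by omega)).2 h
            have hf9 : (List.take 9 pvTableB).find? (fun p => p.1.isPrefixOf (c :: t))
                = some ("hipError_t".toList, "cudaError_t".toList) := by
              rw [show List.take 9 pvTableB = List.take 8 pvTableB ++ [("hipError_t".toList, "cudaError_t".toList)] from by decide,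
                List.find?_append, hf8]
              have hpos : ("hipError_t".toList).isPrefixOf (c :: t) = true := by
                rw [List.isPrefixOf_iff_prefix]
                exact ⟨z, hz⟩
              rw [Option.none_or]
              exact List.find?_cons_of_pos (by simpa using hpos)
            rw [hscan8, pvRepl_head _ _ _ (by decide) (List.prefix_append _ _), List.drop_left,
              pvScan_cons_some _ c t _ _ (by decide) hf9, hdropz]
            have hinf' : pvPat <:+: z := by
              refine pvInfix_shift "hipError_t".toList z pvPat ?_ (by rwa [hz])
              intro m hm hc
              rcases pvPrefix_append_cases hc with h | h
              · exact ((by decide : ∀ m < ("hipError_t".toList).length,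
                  ¬ pvPat <+: "hipError_t".toList.drop m ∧ ¬ "hipError_t".toList.drop m <+: pvPat)
                  m hm).1 h
              · exact ((by decide : ∀ m < ("hipError_t".toList).length,
                  ¬ pvPat <+: "hipError_t".toList.drop m ∧ ¬ "hipError_t".toList.drop m <+: pvPat)
                  m hm).2 h
            have hzl : z.length ≤ n := by
              have hlen := congrArg List.length hz
              simp at hlen hl
              omega
            obtain ⟨u, ra, rb, hx, hy⟩ := ih z hzl hinf'
            exact ⟨"cudaError_t".toList ++ u, ra, rb, by rw [hx]; simp, by rw [hy]; simp⟩
          · -- nothing matches: both sides copy the character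
            rw [pvScan_cons_none _ c t hf8]
            have hnomatch : ¬ "hipError_t".toList <+: c :: pvScan (List.take 8 pvTableB) t := by
              intro hcon
              rw [show "hipError_t".toList = 'h' :: "ipError_t".toList from by decide,
                List.cons_prefix_cons] at hcon
              obtain ⟨hch, htail⟩ := hcon
              have hdrop1 : ("hipError_t".toList).drop 1 = "ipError_t".toList := by decide
              refine pvScan_no_new_head pvPat (List.take 8 pvTableB) "hipError_t".toList
                (by decide)
                (by decide)
                (by decide)
                t 1 (le_refl 1) (by decide) ?_ ?_ (by rwa [hdrop1])
              · rw [hdrop1]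
                intro hc
                exact h9 (by
                  rw [show "hipError_t".toList = 'h' :: "ipError_t".toList from by decide, ← hch]
                  exact List.cons_prefix_cons.mpr ⟨rfl, hc⟩)
              · rw [show ("hipError_t".toList).take 1 = ['h'] from by decide, hch]
                intro hc
                exact hhead (by simpa using hc)
            rw [pvRepl_cons_neg _ _ _ _ hnomatch]
            have hf9 : (List.take 9 pvTableB).find? (fun p => p.1.isPrefixOf (c :: t)) = none := by
              rw [show List.take 9 pvTableB = List.take 8 pvTableB ++ [("hipError_t".toList, "cudaError_t".toList)] from by decide,
                List.find?_append, hf8]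
              rw [Option.none_or, List.find?_cons_of_neg (by simpa [List.isPrefixOf_iff_prefix] using h9)]
              rfl
            rw [pvScan_cons_none _ c t hf9]
            have hinf' : pvPat <:+: t := by
              rcases List.infix_cons_iff.mp hinf with h | h
              · exact absurd h hhead
              · exact h
            obtain ⟨u, ra, rb, hx, hy⟩ := ih t (by simpa using Nat.lt_succ_iff.mp (by simpa using hl)) hinf'
            exact ⟨c :: u, ra, rb, by rw [hx]; simp, by rw [hy]; simp⟩
  exact fun l => main l.length l (le_refl _)


-- the final hipSuccess pass cannot erase the difference between the two blocks
theorem pvR10diff : ∀ (u ra rb : List Char),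
    pvRepl "hipSuccess".toList "cudaSuccess".toList (u ++ "cudaError_threadIdx".toList ++ ra)
      ≠ pvRepl "hipSuccess".toList "cudaSuccess".toList (u ++ "hipError_threadIdx".toList ++ rb) := by
  have main : ∀ (n : Nat) (u : List Char), u.length ≤ n → ∀ (ra rb : List Char),
      pvRepl "hipSuccess".toList "cudaSuccess".toList (u ++ "cudaError_threadIdx".toList ++ ra)
        ≠ pvRepl "hipSuccess".toList "cudaSuccess".toList (u ++ "hipError_threadIdx".toList ++ rb) := by
    intro n
    induction n with
    | zero =>
      intro u hu ra rb
      have hu0 : u = [] := List.length_eq_zero_iff.mp (Nat.le_zero.mp hu)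
      subst hu0
      simp only [List.nil_append]
      rw [pvRepl_pass _ _ "cudaError_threadIdx".toList ra (by decide),
        pvRepl_pass _ _ "hipError_threadIdx".toList rb (by decide)]
      intro h
      rw [show "cudaError_threadIdx".toList = 'c' :: "udaError_threadIdx".toList from by decide,
        show "hipError_threadIdx".toList = 'h' :: "ipError_threadIdx".toList from by decide,
        List.cons_append, List.cons_append] at h
      obtain ⟨hch, -⟩ := List.cons.inj h
      exact absurd hch (by decide)
    | succ n ih =>
      intro u hu ra rb
      match u with
      | [] =>
        exact ih [] (by simp) ra rb
      | c0 :: u' =>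
        by_cases hm : "hipSuccess".toList <+: c0 :: u'
        · -- the pass consumes ten characters inside u on both sides
          have h10u : 10 ≤ (c0 :: u').length := by
            have := hm.length_le
            simpa using this
          have hA : "hipSuccess".toList <+: (c0 :: u') ++ "cudaError_threadIdx".toList ++ ra :=
            (hm.trans (List.prefix_append _ _)).trans (List.prefix_append _ _)
          have hB : "hipSuccess".toList <+: (c0 :: u') ++ "hipError_threadIdx".toList ++ rb :=
            (hm.trans (List.prefix_append _ _)).trans (List.prefix_append _ _)
          rw [pvRepl_head _ _ _ (by decide) hA, pvRepl_head _ _ _ (by decide) hB]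
          rw [List.append_assoc, List.append_assoc,
            List.drop_append_of_le_length (by simpa using h10u),
            List.drop_append_of_le_length (by simpa using h10u),
            ← List.append_assoc, ← List.append_assoc]
          intro h
          have h2 := List.append_cancel_left h
          refine ih ((c0 :: u').drop ("hipSuccess".toList).length) ?_ ra rb h2
          rw [show ("hipSuccess".toList).length = 10 from by decide]
          simp at hu h10u ⊢
          omega
        · have hnA : ¬ "hipSuccess".toList <+: (c0 :: u') ++ "cudaError_threadIdx".toList ++ ra := by
            intro hc
            rw [List.append_assoc] at hc
            rcases pvPrefix_append_cases hc with h | h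
            · exact hm h
            · obtain ⟨z, hz⟩ := h
              have hzp : z <+: "cudaError_threadIdx".toList ++ ra :=
                (List.prefix_append_right_inj (c0 :: u')).mp (by rw [hz]; exact hc)
              rcases pvPrefix_append_cases hzp with h2 | h2
              · have hzne : z ≠ [] := by
                  intro h0
                  subst h0
                  rw [List.append_nil] at hz
                  exact hm (hz ▸ List.prefix_rfl)
                have hzd : z = ("hipSuccess".toList).drop (c0 :: u').length := by
                  rw [← hz, List.drop_left]
                have hdlt : (c0 :: u').length < 10 := by
                  have hlen : (c0 :: u').length + z.length = ("hipSuccess".toList).length := by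
                    rw [← hz]
                    simp
                    omega
                  rw [show ("hipSuccess".toList).length = 10 from by decide] at hlen
                  have hzpos : 0 < z.length := List.length_pos_iff.mpr hzne
                  omega
                exact (by decide : ∀ d < 10, 1 ≤ d →
                    ¬ ("hipSuccess".toList).drop d <+: "cudaError_threadIdx".toList)
                  (c0 :: u').length hdlt (by simp) (hzd ▸ h2)
              · have hlz : (19 : Nat) ≤ z.length := by
                  simpa [show ("cudaError_threadIdx".toList).length = 19 from by decide]
                    using h2.length_le
                have hzl : z.length ≤ 10 := by
                  have := congrArg List.length hz
                  simp at this
                  omega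
                omega
          have hnB : ¬ "hipSuccess".toList <+: (c0 :: u') ++ "hipError_threadIdx".toList ++ rb := by
            intro hc
            rw [List.append_assoc] at hc
            rcases pvPrefix_append_cases hc with h | h
            · exact hm h
            · obtain ⟨z, hz⟩ := h
              have hzp : z <+: "hipError_threadIdx".toList ++ rb :=
                (List.prefix_append_right_inj (c0 :: u')).mp (by rw [hz]; exact hc)
              rcases pvPrefix_append_cases hzp with h2 | h2
              · have hzne : z ≠ [] := by
                  intro h0
                  subst h0
                  rw [List.append_nil] at hz
                  exact hm (hz ▸ List.prefix_rfl)
                have hzd : z = ("hipSuccess".toList).drop (c0 :: u').length := by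
                  rw [← hz, List.drop_left]
                have hdlt : (c0 :: u').length < 10 := by
                  have hlen : (c0 :: u').length + z.length = ("hipSuccess".toList).length := by
                    rw [← hz]
                    simp
                    omega
                  rw [show ("hipSuccess".toList).length = 10 from by decide] at hlen
                  have hzpos : 0 < z.length := List.length_pos_iff.mpr hzne
                  omega
                exact (by decide : ∀ d < 10, 1 ≤ d →
                    ¬ ("hipSuccess".toList).drop d <+: "hipError_threadIdx".toList)
                  (c0 :: u').length hdlt (by simp) (hzd ▸ h2)
              · have hlz : (18 : Nat) ≤ z.length := by
                  simpa [show ("hipError_threadIdx".toList).length = 18 from by decide]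
                    using h2.length_le
                have hzl : z.length ≤ 10 := by
                  have := congrArg List.length hz
                  simp at this
                  omega
                omega
          rw [List.cons_append, List.cons_append, List.cons_append, List.cons_append]
          rw [pvRepl_cons_neg _ _ _ _ (by rwa [← List.cons_append, ← List.cons_append]),
            pvRepl_cons_neg _ _ _ _ (by rwa [← List.cons_append, ← List.cons_append])]
          intro h
          obtain ⟨-, h2⟩ := List.cons.inj h
          exact ih u' (by simpa using Nat.lt_succ_iff.mp (by simpa using hu)) ra rb h2
  exact fun u ra rb => main u.length u (le_refl _) ra rb

-- ===== VERDICT (by name: the statement is the Claim_ definition above) =====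
theorem hip_to_cuda_py_spec : Claim_unchanged_hip_to_cuda_py := by
  intro s _ hD
  have havoid : ¬ pvPat <:+: s.toList := by
    intro hc
    exact hD ((PySem.Str.isIn_iff_infix _ _).mpr hc)
  have hlist : (hip_to_cuda_py s).toList = (hip_to_cuda_py_alt s).toList := by
    rw [pvA_toList, pvB_toList, pvChain_eq_scan s.toList havoid]
  have := congrArg String.ofList hlist
  simpa using this
set_option maxRecDepth 100000 in
theorem hip_to_cuda_py_changed : Claim_changed_hip_to_cuda_py := by
  unfold Claim_changed_hip_to_cuda_py; decide

theorem hip_to_cuda_py_tight : Claim_exact_hip_to_cuda_py := by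
  intro s _ hD heq
  have hinf : pvPat <:+: s.toList :=
    (PySem.Str.isIn_iff_infix "hipError_hipThreadIdx" s).mp hD
  obtain ⟨u, ra, rb, hx, hy⟩ := pvT s.toList hinf
  have hl := congrArg String.toList heq
  rw [pvA_toList, pvB_toList, pvChain_to8, ← pvStep10_free s.toList, hx, hy] at hl
  exact pvR10diff u ra rb hl
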